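-- pv_equiv track=rewrite | github.com/ThibeHanssens/CTF_49 | Howest week 1/Thibe/Cryptografie/JTR3/crack.py | all_case_variants
-- ===== SOURCE A (Python) =====
-- import itertools
--
-- def all_case_variants(word):
--     options = []
--     for c in word:
--         if c.isalpha():
--             options.append([c.lower(), c.upper()])
--         else:
--             options.append([c])
--     for combo in itertools.product(*options):
--         yield ''.join(combo)
-- ===== SOURCE B (Python) =====
-- def all_case_variants(word):
--     def gen(i):
--         if i == len(word):
--             yield ''
--         else:
--             c = word[i]
--             opts = [c.lower(), c.upper()] if c.isalpha() else [c]
--             for o in opts: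
--                 for rest in gen(i + 1):
--                     yield o + rest
--     yield from gen(0)
-- ===== Notes on version B (the rewrite author's own statement) =====
-- stated objective: idiomatic
-- what changed: Replaces the two-phase build-options-then-itertools.product enumeration with a direct recursive generator over the word's characters that yields the variants in the same order.
import Mathlib
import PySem

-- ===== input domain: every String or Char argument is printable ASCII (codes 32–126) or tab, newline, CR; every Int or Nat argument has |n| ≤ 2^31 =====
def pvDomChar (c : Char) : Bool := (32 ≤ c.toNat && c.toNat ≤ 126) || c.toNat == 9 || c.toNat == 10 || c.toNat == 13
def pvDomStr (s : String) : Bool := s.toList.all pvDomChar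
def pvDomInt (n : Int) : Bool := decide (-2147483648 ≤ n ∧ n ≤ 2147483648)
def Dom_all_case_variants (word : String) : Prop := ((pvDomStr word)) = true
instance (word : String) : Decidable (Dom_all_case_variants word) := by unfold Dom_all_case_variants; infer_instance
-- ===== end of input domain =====

-- B replaces the build-options-then-itertools.product two-phase enumeration by a direct
-- recursive generator over the characters (same order, same outputs): idiomatic rewrite.

-- ===== PORT A =====
-- options for one character, as A computes them in its first loop
def acvOpts (c : Char) : List Char :=
  if PySem.Chars.isalpha c then [PySem.Chars.lowerChar c, PySem.Chars.upperChar c] else [c]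

-- first loop: options list built by appending
def acvOptions (cs : List Char) : List (List Char) :=
  cs.foldl (fun acc c => acc ++ [acvOpts c]) []

-- itertools.product(*options): prefixes vary slowest, exactly product's order
def acvProduct (options : List (List Char)) : List (List Char) :=
  options.foldl (fun acc opts => acc.flatMap (fun p => opts.map (fun o => p ++ [o]))) [[]]

def all_case_variants (word : String) : List String :=
  (acvProduct (acvOptions word.toList)).map String.ofList

-- ===== PORT B =====
-- recursive generator gen(i), transcribed as structural recursion over the remaining characters
def acvGen : List Char → List (List Char)
  | [] => [[]]
  | c :: cs =>
    (if PySem.Chars.isalpha c then [PySem.Chars.lowerChar c, PySem.Chars.upperChar c] else [c]).flatMap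
      (fun o => (acvGen cs).map (fun rest => o :: rest))

def all_case_variants_alt (word : String) : List String :=
  (acvGen word.toList).map String.ofList

-- ===== PRECONDITION & SPEC =====
def Spec_all_case_variants (word : String) (out : List String) : Prop := out = all_case_variants_alt word
instance (word : String) (out : List String) : Decidable (Spec_all_case_variants word out) := by unfold Spec_all_case_variants; infer_instance

-- ===== CLAIM (what is proved, stated in full; the proofs are below) =====
def Claim_equal_all_case_variants : Prop := ∀ (word : String), Dom_all_case_variants word → Spec_all_case_variants word (all_case_variants word)

-- ===== LEMMAS AND PROOFS =====

theorem acvOptions_eq_map (cs : List Char) : acvOptions cs = cs.map acvOpts := by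
  suffices h : ∀ (cs : List Char) (acc : List (List Char)),
      cs.foldl (fun acc c => acc ++ [acvOpts c]) acc = acc ++ cs.map acvOpts by
    simpa [acvOptions] using h cs []
  intro cs
  induction cs with
  | nil => simp
  | cons c cs ih => intro acc; simp [List.foldl, ih]

theorem acvProduct_map_eq (cs : List Char) (acc : List (List Char)) :
    (cs.map acvOpts).foldl (fun acc opts => acc.flatMap (fun p => opts.map (fun o => p ++ [o]))) acc
      = acc.flatMap (fun p => (acvGen cs).map (fun r => p ++ r)) := by
  induction cs generalizing acc with
  | nil => simp [acvGen]
  | cons c cs ih =>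
    simp only [List.map_cons, List.foldl_cons, ih, acvGen, acvOpts]
    simp [List.flatMap_assoc, List.flatMap_map, List.map_flatMap,
      List.map_map, Function.comp_def, List.append_assoc]

-- ===== VERDICT (by name: the statement is the Claim_ definition above) =====
theorem all_case_variants_spec : Claim_equal_all_case_variants := by
  intro word _
  unfold Spec_all_case_variants all_case_variants all_case_variants_alt acvProduct
  rw [acvOptions_eq_map, acvProduct_map_eq]
  simp
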